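-- pv_equiv track=rewrite | github.com/violettagoldman/Skyscraper | generator.py | check_vect_not_full
-- ===== SOURCE A (Python) =====
-- def check_vect_not_full(vect):
--     for i in range(1, len(vect) + 1):
--         count = 0
--         for j in vect:
--             if (j == i):
--                 count += 1
--         if (count > 1):
--             return False
--     return True
-- ===== SOURCE B (Python) =====
-- def check_vect_not_full(vect):
--     n = len(vect)
--     seen = set()
--     for j in vect:
--         if 1 <= j <= n:
--             if j in seen:
--                 return False
--             seen.add(j)
--     return True
-- ===== Notes on version B (the rewrite author's own statement) =====
-- stated objective: faster
-- what changed: Replaces the candidate-loop (for each i in 1..n count occurrences by rescanning vect) with a single pass over vect maintaining a seen-set of in-range values, returning False at the first repeat.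
import Mathlib
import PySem

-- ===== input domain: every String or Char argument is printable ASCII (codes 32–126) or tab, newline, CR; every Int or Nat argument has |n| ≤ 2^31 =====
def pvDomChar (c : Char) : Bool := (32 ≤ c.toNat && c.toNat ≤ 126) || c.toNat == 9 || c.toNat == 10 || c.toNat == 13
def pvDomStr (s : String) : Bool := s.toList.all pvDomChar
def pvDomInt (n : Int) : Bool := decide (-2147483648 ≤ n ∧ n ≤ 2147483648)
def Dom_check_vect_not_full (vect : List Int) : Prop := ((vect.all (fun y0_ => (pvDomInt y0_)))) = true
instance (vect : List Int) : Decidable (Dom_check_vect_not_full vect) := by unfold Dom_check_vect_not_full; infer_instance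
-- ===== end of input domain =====

-- B replaces A's nested rescan per candidate value with one pass over vect and a seen-set (objective: faster).

-- ===== PORT A =====
def cvnfA_count (vect : List Int) (i : Int) : Int :=
  vect.foldl (fun c j => if j == i then c + 1 else c) 0

def cvnfA_loop (vect : List Int) : List Int → Bool
  | [] => true
  | i :: rest => if cvnfA_count vect i > 1 then false else cvnfA_loop vect rest

def check_vect_not_full (vect : List Int) : Bool :=
  cvnfA_loop vect (PySem.List.pyRange 1 ((vect.length : Int) + 1) 1)

-- ===== PORT B =====
def cvnfB_loop (n : Int) : List Int → PySem.Set Int → Bool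
  | [], _ => true
  | j :: rest, seen =>
    if 1 ≤ j ∧ j ≤ n then
      if seen.contains j then false
      else cvnfB_loop n rest (PySem.Set.add seen j)
    else cvnfB_loop n rest seen

def check_vect_not_full_alt (vect : List Int) : Bool :=
  cvnfB_loop (vect.length : Int) vect PySem.Set.empty

-- ===== PRECONDITION & SPEC =====
def Spec_check_vect_not_full (vect : List Int) (out : Bool) : Prop := out = check_vect_not_full_alt vect
instance (vect : List Int) (out : Bool) : Decidable (Spec_check_vect_not_full vect out) := by unfold Spec_check_vect_not_full; infer_instance

-- ===== CLAIM (what is proved, stated in full; the proofs are below) =====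
def Claim_equal_check_vect_not_full : Prop := ∀ (vect : List Int), Dom_check_vect_not_full vect → Spec_check_vect_not_full vect (check_vect_not_full vect)

-- ===== LEMMAS AND PROOFS =====

-- A's inner loop computes List.count.
theorem cvnfA_count_eq (vect : List Int) (i : Int) :
    cvnfA_count vect i = (vect.count i : Int) := by
  unfold cvnfA_count
  suffices h : ∀ (c : Int), vect.foldl (fun c j => if j == i then c + 1 else c) c
      = c + (vect.count i : Int) by simpa using h 0
  induction vect with
  | nil => simp
  | cons x xs ih =>
    intro c
    by_cases hx : x = i
    · subst hx
      rw [List.foldl_cons, if_pos (by simp), ih, List.count_cons_self]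
      push_cast; ring
    · rw [List.foldl_cons, if_neg (by simp [hx]), ih, List.count_cons_of_ne hx]

-- A's outer loop returns true iff no listed candidate occurs more than once.
theorem cvnfA_loop_eq_true (vect : List Int) (is : List Int) :
    cvnfA_loop vect is = true ↔ ∀ i ∈ is, vect.count i ≤ 1 := by
  induction is with
  | nil => simp [cvnfA_loop]
  | cons i rest ih =>
    simp only [cvnfA_loop, cvnfA_count_eq]
    split_ifs with h
    · simp only [false_iff]
      intro hall
      have := hall i (by simp)
      omega
    · simp only [ih, List.mem_cons]
      constructor
      · rintro hall j (rfl | hj)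
        · omega
        · exact hall j hj
      · intro hall j hj
        exact hall j (Or.inr hj)

-- B's loop invariant: true iff the in-range elements are pairwise distinct and disjoint from seen.
theorem cvnfB_loop_eq_true (n : Int) (xs : List Int) (seen : PySem.Set Int) :
    cvnfB_loop n xs seen = true ↔
      ((xs.filter (fun j => decide (1 ≤ j ∧ j ≤ n))).Nodup ∧
        ∀ j ∈ xs, (1 ≤ j ∧ j ≤ n) → j ∉ seen) := by
  induction xs generalizing seen with
  | nil => simp [cvnfB_loop]
  | cons x xs ih =>
    by_cases hx : 1 ≤ x ∧ x ≤ n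
    · by_cases hmem : x ∈ seen
      · have hstep : cvnfB_loop n (x :: xs) seen = false := by
          simp [cvnfB_loop, hx, PySem.Set.contains, hmem]
        rw [hstep]
        simp only [Bool.false_eq_true, false_iff]
        rintro ⟨-, hdisj⟩
        exact hdisj x (by simp) hx hmem
      · have hstep : cvnfB_loop n (x :: xs) seen = cvnfB_loop n xs (PySem.Set.add seen x) := by
          simp [cvnfB_loop, hx, PySem.Set.contains, hmem]
        rw [hstep, ih]
        simp only [List.filter_cons, decide_eq_true_eq, if_pos hx, List.nodup_cons,
          List.mem_filter, decide_eq_true_eq, List.mem_cons, PySem.Set.mem_add]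
        constructor
        · rintro ⟨hnd, hdisj⟩
          have hnx : ¬(x ∈ xs ∧ 1 ≤ x ∧ x ≤ n) := fun hc =>
            hdisj x hc.1 hx (Or.inr rfl)
          refine ⟨⟨hnx, hnd⟩, ?_⟩
          rintro j (rfl | hj) hjr hjs
          · exact hmem hjs
          · exact hdisj j hj hjr (Or.inl hjs)
        · rintro ⟨⟨hnx, hnd⟩, hdisj⟩
          refine ⟨hnd, ?_⟩
          rintro j hj hjr (hjs | rfl)
          · exact hdisj j (Or.inr hj) hjr hjs
          · exact hnx ⟨hj, hjr⟩
    · have hstep : cvnfB_loop n (x :: xs) seen = cvnfB_loop n xs seen := by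
        simp [cvnfB_loop, hx]
      rw [hstep, ih]
      simp only [List.filter_cons, decide_eq_true_eq, if_neg hx, List.mem_cons]
      constructor
      · rintro ⟨hnd, hdisj⟩
        refine ⟨hnd, ?_⟩
        rintro j (rfl | hj) hjr
        · exact absurd hjr hx
        · exact hdisj j hj hjr
      · rintro ⟨hnd, hdisj⟩
        exact ⟨hnd, fun j hj hjr => hdisj j (Or.inr hj) hjr⟩

theorem cvnf_eq (vect : List Int) : check_vect_not_full vect = check_vect_not_full_alt vect := by
  have hA : check_vect_not_full vect = true ↔
      ∀ i, 1 ≤ i → i ≤ (vect.length : Int) → vect.count i ≤ 1 := by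
    unfold check_vect_not_full
    rw [cvnfA_loop_eq_true]
    constructor
    · intro h i h1 h2
      exact h i (by rw [PySem.List.mem_pyRange_one]; omega)
    · intro h i hi
      rw [PySem.List.mem_pyRange_one] at hi
      exact h i hi.1 (by omega)
  have hB : check_vect_not_full_alt vect = true ↔
      ∀ i, 1 ≤ i → i ≤ (vect.length : Int) → vect.count i ≤ 1 := by
    unfold check_vect_not_full_alt
    rw [cvnfB_loop_eq_true]
    simp only [PySem.Set.empty, List.not_mem_nil, not_false_iff, implies_true, and_true]
    rw [List.nodup_iff_count_le_one]
    constructor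
    · intro h i h1 h2
      rw [← List.count_filter (p := fun j => decide (1 ≤ j ∧ j ≤ (vect.length : Int)))
        (by simp [h1, h2])]
      exact h i
    · intro h i
      by_cases hi : 1 ≤ i ∧ i ≤ (vect.length : Int)
      · rw [List.count_filter (p := fun j => decide (1 ≤ j ∧ j ≤ (vect.length : Int)))
          (by simp [hi.1, hi.2])]
        exact h i hi.1 hi.2
      · have : i ∉ vect.filter (fun j => decide (1 ≤ j ∧ j ≤ (vect.length : Int))) := fun hc =>
          hi (by simpa using (List.mem_filter.mp hc).2)
        rw [List.count_eq_zero.mpr this]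
        omega
  rcases hb : check_vect_not_full_alt vect with _ | _
  · rcases ha : check_vect_not_full vect with _ | _
    · rfl
    · exact absurd (hB.mpr (hA.mp ha)) (by simp [hb])
  · exact hA.mpr (hB.mp hb)

-- ===== VERDICT (by name: the statement is the Claim_ definition above) =====
theorem check_vect_not_full_spec : Claim_equal_check_vect_not_full := by
  intro vect _
  exact cvnf_eq vect
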